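-- pv_equiv track=rewrite | github.com/lukmdo/code4gcj | 2013/qualification/Blawnmower.py | is_doable
-- ===== SOURCE A (Python) =====
-- from collections import defaultdict
--
-- def is_doable(data):
--     w, h = len(data[0]), len(data)
--     if w == 1 or h == 1:
--         return True
--
--     ltp = defaultdict(set)  # Lever To Points
--     for y in range(h):
--         for x in range(w):
--             ltp[data[y][x]].add((y, x))
--
--     none_is_higher = lambda pts, l: all(data[p[0]][p[1]] <= l for p in pts)
--
--     for l in sorted(ltp):
--         l_points = set(ltp[l])
--         while l_points:
--             point = l_points.pop()
--             horizontal_points = [(point[0], x) for x in range(w)]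
--             if none_is_higher(horizontal_points, l):
--                 l_points -= set(horizontal_points)
--             else:
--                 vertical_points = [(y, point[1]) for y in range(h)]
--                 if none_is_higher(vertical_points, l):
--                     l_points -= set(vertical_points)
--                 else:
--                     return False
--
--     return True
-- ===== SOURCE B (Python) =====
-- def is_doable(data):
--     w, h = len(data[0]), len(data)
--     if w <= 1 or h <= 1:
--         return True
--     row_max = [max(row[:w]) for row in data]
--     col_max = [max(row[x] for row in data) for x in range(w)]
--     return all(data[y][x] == row_max[y] or data[y][x] == col_max[x]
--                for y in range(h) for x in range(w))
-- ===== Notes on version B (the rewrite author's own statement) =====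
-- stated objective: faster
-- what changed: Replaces A's level-by-level sweep (defaultdict of point sets, sorted levels, while-loop popping points and re-scanning the whole row/column per point) by precomputed row and column maxima: each cell must equal its row max or its column max, checked in one pass.
import Mathlib
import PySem

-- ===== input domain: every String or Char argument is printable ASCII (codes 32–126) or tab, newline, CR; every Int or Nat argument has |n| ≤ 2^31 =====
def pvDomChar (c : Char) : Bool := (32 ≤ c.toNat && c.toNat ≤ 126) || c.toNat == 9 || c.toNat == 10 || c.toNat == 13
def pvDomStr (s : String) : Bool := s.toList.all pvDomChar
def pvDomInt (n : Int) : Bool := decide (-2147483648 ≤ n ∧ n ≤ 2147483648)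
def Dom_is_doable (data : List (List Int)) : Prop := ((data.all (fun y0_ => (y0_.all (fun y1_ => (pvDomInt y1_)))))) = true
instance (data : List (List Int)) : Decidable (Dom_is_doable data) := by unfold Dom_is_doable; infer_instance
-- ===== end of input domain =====

-- B replaces A's sorted-level sweep with removal sets by precomputed row/column maxima
-- (each cell must equal its row max or its column max): one pass instead of per-cell line scans.
-- A's set.pop() iterates a Python set in hash order; the RETURN VALUE is order-independent
-- (proved equal to the order-free B), and only the return value is claimed.

-- ===== PORT A =====

-- data[y][x]; exact under Pre_ (every access A performs is in range there)
def pvAt (data : List (List Int)) (y x : Int) : Int :=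
  PySem.List.pyGetD (PySem.List.pyGetD data y []) x 0

-- none_is_higher = lambda pts, l: all(data[p[0]][p[1]] <= l for p in pts)
def pvNoneHigher (data : List (List Int)) (pts : List (Int × Int)) (l : Int) : Bool :=
  pts.all (fun p => pvAt data p.1 p.2 ≤ l)

-- termination helper for the while loop (the set only shrinks)
theorem pvDiff_len_le {α : Type} [BEq α] (s t : List α) :
    (PySem.Set.diff s t).length ≤ s.length := by
  simpa [PySem.Set.diff] using List.length_filter_le _ s

-- the 'while l_points:' loop; set.pop() ported as taking the head of the set's list
def pvLevelLoop (data : List (List Int)) (w h l : Int) : List (Int × Int) → Bool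
  | [] => true
  | point :: rest =>
    let horizontal := (PySem.List.pyRange 0 w 1).map (fun x => (point.1, x))
    if pvNoneHigher data horizontal l then
      pvLevelLoop data w h l (PySem.Set.diff rest horizontal)
    else
      let vertical := (PySem.List.pyRange 0 h 1).map (fun y => (y, point.2))
      if pvNoneHigher data vertical l then
        pvLevelLoop data w h l (PySem.Set.diff rest vertical)
      else false
  termination_by pts => pts.length
  decreasing_by
  · exact Nat.lt_succ_of_le (pvDiff_len_le _ _)
  · exact Nat.lt_succ_of_le (pvDiff_len_le _ _)

def is_doable (data : List (List Int)) : Bool :=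
  let w : Int := (data.headI.length : Int)   -- len(data[0]); Pre_ gives data ≠ []
  let h : Int := (data.length : Int)
  if w == 1 || h == 1 then true
  else
    -- ltp = defaultdict(set); for y … for x …: ltp[data[y][x]].add((y, x))
    let ltp : PySem.Dict Int (PySem.Set (Int × Int)) :=
      (PySem.List.pyRange 0 h 1).foldl (fun d y =>
        (PySem.List.pyRange 0 w 1).foldl (fun d x =>
          d.modify (pvAt data y x) [] (fun s => PySem.Set.add s (y, x))) d) PySem.Dict.empty
    -- for l in sorted(ltp): … (early return False ≡ all)
    (PySem.List.sorted ltp.keys (fun k => k) false).all (fun l =>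
      pvLevelLoop data (data.headI.length : Int) (data.length : Int) l (ltp.getD l []))

-- ===== PORT B =====

def is_doable_alt (data : List (List Int)) : Bool :=
  let w : Int := (data.headI.length : Int)
  let h : Int := (data.length : Int)
  if w ≤ 1 || h ≤ 1 then true
  else
    -- row_max = [max(row[:w]) for row in data]  (rows nonempty here: w ≥ 2 under Pre_)
    let rowMax : List Int :=
      data.map (fun row => (PySem.List.max? (PySem.List.slice row none (some w)) (fun v => v)).getD 0)
    -- col_max = [max(row[x] for row in data) for x in range(w)]
    let colMax : List Int :=
      (PySem.List.pyRange 0 w 1).map (fun x =>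
        (PySem.List.max? (data.map (fun row => PySem.List.pyGetD row x 0)) (fun v => v)).getD 0)
    (PySem.List.pyRange 0 h 1).all (fun y =>
      (PySem.List.pyRange 0 w 1).all (fun x =>
        pvAt data y x == PySem.List.pyGetD rowMax y 0 ||
        pvAt data y x == PySem.List.pyGetD colMax x 0))

-- ===== PRECONDITION & SPEC =====

-- Exactly where the Python A returns normally: the grid has at least one row (A indexes
-- data[0] immediately, IndexError otherwise) and, unless the trivial guard w==1 or h==1
-- fires first, every row is long enough for the width-w accesses data[y][x]
-- (a shorter row raises IndexError). B raises on the same inputs.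
def Pre_is_doable (data : List (List Int)) : Prop :=
  data ≠ [] ∧
    (data.headI.length = 1 ∨ data.length = 1 ∨
      ∀ row ∈ data, data.headI.length ≤ row.length)
instance (data : List (List Int)) : Decidable (Pre_is_doable data) := by
  unfold Pre_is_doable; infer_instance

def pvWitness_is_doable : List (List Int) := [[2, 1], [1, 2]]

def Spec_is_doable (data : List (List Int)) (out : Bool) : Prop := out = is_doable_alt data
instance (data : List (List Int)) (out : Bool) : Decidable (Spec_is_doable data out) := by
  unfold Spec_is_doable; infer_instance

-- ===== CLAIM (what is proved, stated in full; the proofs are below) =====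
def Claim_equal_is_doable : Prop := ∀ (data : List (List Int)), Dom_is_doable data → Pre_is_doable data → Spec_is_doable data (is_doable data)

-- ===== LEMMAS AND PROOFS =====

-- row test: all of row y (within width w) is ≤ l
def pvRowLE (data : List (List Int)) (w y l : Int) : Bool :=
  (PySem.List.pyRange 0 w 1).all (fun x => pvAt data y x ≤ l)

-- column test
def pvColLE (data : List (List Int)) (h x l : Int) : Bool :=
  (PySem.List.pyRange 0 h 1).all (fun y => pvAt data y x ≤ l)

theorem pvNoneHigher_hor (data : List (List Int)) (w y l : Int) :
    pvNoneHigher data ((PySem.List.pyRange 0 w 1).map (fun x => (y, x))) l =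
      pvRowLE data w y l := by
  simp only [pvNoneHigher, pvRowLE, List.all_map]; rfl

theorem pvNoneHigher_ver (data : List (List Int)) (h x l : Int) :
    pvNoneHigher data ((PySem.List.pyRange 0 h 1).map (fun y => (y, x))) l =
      pvColLE data h x l := by
  simp only [pvNoneHigher, pvColLE, List.all_map]; rfl

theorem all_diff_eq {α : Type} [BEq α] [LawfulBEq α] (s t : List α) (P : α → Bool)
    (h : ∀ q ∈ s, q ∈ t → P q) : (PySem.Set.diff s t).all P = s.all P := by
  induction s with
  | nil => rfl
  | cons a s ih =>
    have hrest : ∀ q ∈ s, q ∈ t → P q := fun q hq => h q (List.mem_cons_of_mem a hq)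
    by_cases ha : a ∈ t
    · have hd : PySem.Set.diff (a :: s) t = PySem.Set.diff s t := by
        simp [PySem.Set.diff, ha]
      rw [hd, ih hrest, List.all_cons, h a List.mem_cons_self ha, Bool.true_and]
    · have hd : PySem.Set.diff (a :: s) t = a :: PySem.Set.diff s t := by
        simp [PySem.Set.diff, ha]
      rw [hd, List.all_cons, List.all_cons, ih hrest]

-- the while loop returns 'every point's row or column is all ≤ l'
theorem pvLevelLoop_eq (data : List (List Int)) (w h l : Int) (pts : List (Int × Int)) :
    pvLevelLoop data w h l pts =
      pts.all (fun p => pvRowLE data w p.1 l || pvColLE data h p.2 l) := by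
  generalize hn : pts.length = n
  induction n using Nat.strong_induction_on generalizing pts with
  | _ n ih =>
    match pts, hn with
    | [], _ => simp [pvLevelLoop]
    | point :: rest, hn =>
      rw [pvLevelLoop]
      simp only []
      by_cases hrow :
          pvNoneHigher data ((PySem.List.pyRange 0 w 1).map (fun x => (point.1, x))) l = true
      · rw [if_pos hrow]
        rw [ih (PySem.Set.diff rest ((PySem.List.pyRange 0 w 1).map (fun x => (point.1, x)))).length
              (by have := pvDiff_len_le rest ((PySem.List.pyRange 0 w 1).map (fun x => (point.1, x))); subst hn; simp only [List.length_cons]; omega) _ rfl]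
        rw [all_diff_eq]
        · rw [pvNoneHigher_hor] at hrow
          simp [hrow]
        · intro q hq hqt
          simp only [List.mem_map, PySem.List.mem_pyRange_one] at hqt
          obtain ⟨x, hx, rfl⟩ := hqt
          rw [pvNoneHigher_hor] at hrow
          simp [hrow]
      · rw [if_neg hrow]
        by_cases hcol :
            pvNoneHigher data ((PySem.List.pyRange 0 h 1).map (fun y => (y, point.2))) l = true
        · rw [if_pos hcol]
          rw [ih (PySem.Set.diff rest ((PySem.List.pyRange 0 h 1).map (fun y => (y, point.2)))).length
                (by have := pvDiff_len_le rest ((PySem.List.pyRange 0 h 1).map (fun y => (y, point.2))); subst hn; simp only [List.length_cons]; omega) _ rfl]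
          rw [all_diff_eq]
          · rw [pvNoneHigher_hor] at hrow
            rw [pvNoneHigher_ver] at hcol
            simp [Bool.not_eq_true] at hrow
            simp [hrow, hcol]
          · intro q hq hqt
            simp only [List.mem_map, PySem.List.mem_pyRange_one] at hqt
            obtain ⟨y, hy, rfl⟩ := hqt
            rw [pvNoneHigher_ver] at hcol
            simp [hcol]
        · rw [if_neg hcol]
          rw [pvNoneHigher_hor] at hrow
          rw [pvNoneHigher_ver] at hcol
          simp [Bool.not_eq_true] at hrow hcol
          simp [hrow, hcol]

-- the grid of all (y, x) points, y-major (the build order of A's dict)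
def pvGrid (w h : Int) : List (Int × Int) :=
  (PySem.List.pyRange 0 h 1).flatMap (fun y => (PySem.List.pyRange 0 w 1).map (fun x => (y, x)))

-- per-point verdict both programs compute
def pvOK (data : List (List Int)) (w h : Int) (p : Int × Int) : Bool :=
  pvRowLE data w p.1 (pvAt data p.1 p.2) || pvColLE data h p.2 (pvAt data p.1 p.2)

theorem pvBuild_eq (data : List (List Int)) (w h : Int) :
    ((PySem.List.pyRange 0 h 1).foldl (fun d y =>
        (PySem.List.pyRange 0 w 1).foldl (fun d x =>
          d.modify (pvAt data y x) [] (fun s => PySem.Set.add s (y, x))) d) PySem.Dict.empty)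
      = (pvGrid w h).foldl (fun d p =>
          d.modify (pvAt data p.1 p.2) [] (fun s => PySem.Set.add s p)) PySem.Dict.empty := by
  rw [pvGrid, List.foldl_flatMap]
  simp only [List.foldl_map]

theorem mem_getD_build (data : List (List Int)) (pts : List (Int × Int))
    (d : PySem.Dict Int (PySem.Set (Int × Int))) (q : Int × Int) (lv : Int) :
    q ∈ (pts.foldl (fun d p =>
          d.modify (pvAt data p.1 p.2) [] (fun s => PySem.Set.add s p)) d).getD lv [] ↔
      q ∈ d.getD lv [] ∨ (q ∈ pts ∧ pvAt data q.1 q.2 = lv) := by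
  induction pts generalizing d with
  | nil => simp
  | cons p pts ih =>
    rw [List.foldl_cons, ih]
    rw [PySem.Dict.getD_modify]
    by_cases hlv : lv = pvAt data p.1 p.2
    · subst hlv
      rw [if_pos rfl]
      rw [PySem.Set.mem_add]
      constructor
      · rintro ((hm | rfl) | ⟨hm, hc⟩)
        · exact Or.inl hm
        · exact Or.inr ⟨List.mem_cons_self, rfl⟩
        · exact Or.inr ⟨List.mem_cons_of_mem _ hm, hc⟩
      · rintro (hm | ⟨hm, hc⟩)
        · exact Or.inl (Or.inl hm)
        · rcases List.mem_cons.1 hm with rfl | hm'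
          · exact Or.inl (Or.inr rfl)
          · exact Or.inr ⟨hm', hc⟩
    · rw [if_neg hlv]
      constructor
      · rintro (hm | ⟨hm, hc⟩)
        · exact Or.inl hm
        · exact Or.inr ⟨List.mem_cons_of_mem _ hm, hc⟩
      · rintro (hm | ⟨hm, hc⟩)
        · exact Or.inl hm
        · rcases List.mem_cons.1 hm with rfl | hm'
          · exact absurd hc.symm hlv
          · exact Or.inr ⟨hm', hc⟩

theorem keys_build (data : List (List Int)) (pts : List (Int × Int)) (lv : Int) :
    lv ∈ (pts.foldl (fun d p =>
        d.modify (pvAt data p.1 p.2) [] (fun s => PySem.Set.add s p)) PySem.Dict.empty).keys ↔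
      ∃ p ∈ pts, pvAt data p.1 p.2 = lv := by
  rw [PySem.Dict.keys_foldl_modify_key pts (fun p => pvAt data p.1 p.2) []
        (fun _ p => fun s => PySem.Set.add s p) PySem.Dict.empty]
  rw [PySem.Dict.keys_empty, PySem.Set.update_nil_left]
  simp [PySem.Set.mem_ofList, List.mem_map]

-- A's else branch: the level sweep over any dict that groups the grid points by value
theorem A_side (data : List (List Int)) (w h : Int) (d : PySem.Dict Int (PySem.Set (Int × Int)))
    (hget : ∀ lv q, q ∈ d.getD lv [] ↔ q ∈ pvGrid w h ∧ pvAt data q.1 q.2 = lv)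
    (hkeys : ∀ lv, lv ∈ d.keys ↔ ∃ p ∈ pvGrid w h, pvAt data p.1 p.2 = lv) :
    (PySem.List.sorted d.keys (fun k => k) false).all
        (fun l => pvLevelLoop data w h l (d.getD l []))
      = (pvGrid w h).all (pvOK data w h) := by
  rw [Bool.eq_iff_iff]
  simp only [List.all_eq_true]
  constructor
  · intro hA p hp
    have h1 := hA (pvAt data p.1 p.2)
      ((PySem.List.mem_sorted _ _ _ _).2 ((hkeys _).2 ⟨p, hp, rfl⟩))
    rw [pvLevelLoop_eq, List.all_eq_true] at h1
    have h2 := h1 p ((hget _ p).2 ⟨hp, rfl⟩)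
    simpa [pvOK] using h2
  · intro hB l _hl
    rw [pvLevelLoop_eq, List.all_eq_true]
    intro q hq
    obtain ⟨hqg, hql⟩ := (hget l q).1 hq
    have h3 := hB q hqg
    rw [pvOK] at h3
    rw [← hql]
    simpa using h3

-- max over a nonempty list: v equals the max iff v dominates every element
theorem max_char {ys : List Int} {m v : Int}
    (hm : PySem.List.max? ys (fun u => u) = some m) (hv : v ∈ ys) :
    v = m ↔ ∀ u ∈ ys, u ≤ v := by
  constructor
  · rintro rfl u hu
    exact PySem.List.max?_isMax hm u hu
  · intro hall
    have h1 : v ≤ m := PySem.List.max?_isMax hm v hv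
    have h2 : m ≤ v := hall m (PySem.List.max?_mem hm)
    omega

-- pvRowLE over the Int range ↔ Nat-indexed row entries
theorem pvRowLE_iff (data : List (List Int)) (W : Nat) (y l : Int)
    (hy0 : 0 ≤ y) (hy : y < (data.length : Int)) :
    pvRowLE data (W : Int) y l = true ↔
      ∀ j : Nat, j < W → (data[y.toNat]'(by omega)).getD j 0 ≤ l := by
  have hrow : PySem.List.pyGetD data y [] = data[y.toNat]'(by omega) :=
    PySem.List.pyGetD_eq_getElem data [] hy0 hy
  simp only [pvRowLE, List.all_eq_true, PySem.List.mem_pyRange_one, decide_eq_true_eq, and_imp]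
  constructor
  · intro hx j hj
    have h2 := hx (j : Int) (by omega) (by omega)
    simp only [pvAt, hrow, PySem.List.pyGetD_natCast] at h2
    exact h2
  · intro hj x hx0 hxW
    have hx' : x = ((x.toNat : Nat) : Int) := by omega
    rw [hx']
    simp only [pvAt, hrow, PySem.List.pyGetD_natCast]
    exact hj x.toNat (by omega)

-- pvColLE over the Int range ↔ Nat-indexed rows
theorem pvColLE_iff (data : List (List Int)) (x l : Int) :
    pvColLE data (data.length : Int) x l = true ↔
      ∀ i : Nat, (hi : i < data.length) → PySem.List.pyGetD (data[i]'hi) x 0 ≤ l := by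
  simp only [pvColLE, List.all_eq_true, PySem.List.mem_pyRange_one, decide_eq_true_eq, and_imp]
  constructor
  · intro hy i hi
    have h2 := hy (i : Int) (by omega) (by omega)
    have hr : PySem.List.pyGetD data (i : Int) [] = data[i]'hi :=
      PySem.List.pyGetD_eq_getElem data [] (by omega) (by omega)
    simp only [pvAt, hr] at h2
    exact h2
  · intro hi y hy0 hyH
    have hr : PySem.List.pyGetD data y [] = data[y.toNat]'(by omega) :=
      PySem.List.pyGetD_eq_getElem data [] hy0 hyH
    simp only [pvAt, hr]
    exact hi y.toNat (by omega)

-- a cell equals B's row maximum iff A's row test succeeds at that cell's value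
theorem pw_row (data : List (List Int)) (W : Nat) (hW : 1 ≤ W) (y x : Int)
    (hy0 : 0 ≤ y) (hy : y < (data.length : Int)) (hx0 : 0 ≤ x) (hx : x < (W : Int))
    (hrowlen : W ≤ (data[y.toNat]'(by omega)).length) :
    (pvAt data y x == PySem.List.pyGetD (data.map (fun row =>
        (PySem.List.max? (PySem.List.slice row none (some (W : Int))) (fun v => v)).getD 0)) y 0)
      = pvRowLE data (W : Int) y (pvAt data y x) := by
  have hylt : y.toNat < data.length := by omega
  have hrow : PySem.List.pyGetD data y [] = data[y.toNat]'hylt :=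
    PySem.List.pyGetD_eq_getElem data [] hy0 hy
  have hmape : PySem.List.pyGetD (data.map (fun row =>
      (PySem.List.max? (PySem.List.slice row none (some (W : Int))) (fun v => v)).getD 0)) y 0
      = (PySem.List.max? (PySem.List.slice (data[y.toNat]'hylt) none (some (W : Int)))
          (fun v => v)).getD 0 := by
    rw [PySem.List.pyGetD_eq_getElem _ _ hy0 (by simpa using hy)]
    simp
  have hslice : PySem.List.slice (data[y.toNat]'hylt) none (some (W : Int))
      = (data[y.toNat]'hylt).take W :=
    PySem.List.slice_to_natCast _ W
  have hrl : W ≤ (data[y.toNat]'hylt).length := hrowlen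
  have htne : (data[y.toNat]'hylt).take W ≠ [] := by
    have hlen : ((data[y.toNat]'hylt).take W).length = W := by
      rw [List.length_take]; omega
    intro hcon
    rw [hcon] at hlen
    simp at hlen
    omega
  obtain ⟨m, hm⟩ : ∃ m, PySem.List.max? ((data[y.toNat]'hylt).take W) (fun v => v) = some m := by
    cases hmm : PySem.List.max? ((data[y.toNat]'hylt).take W) (fun v => v) with
    | none => exact absurd ((PySem.List.max?_eq_none_iff _ _).1 hmm) htne
    | some m => exact ⟨m, rfl⟩
  have hxlt : x.toNat < (data[y.toNat]'hylt).length := by omega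
  have hcell : pvAt data y x = (data[y.toNat]'hylt)[x.toNat]'hxlt := by
    simp only [pvAt, hrow]
    exact PySem.List.pyGetD_eq_getElem _ 0 hx0 (by omega)
  have hcellmem : pvAt data y x ∈ (data[y.toNat]'hylt).take W := by
    rw [hcell]
    exact List.mem_take_iff_getElem.2 ⟨x.toNat, by omega, rfl⟩
  rw [hmape, hslice, hm, Option.getD_some]
  rw [Bool.eq_iff_iff, beq_iff_eq, max_char hm hcellmem,
    pvRowLE_iff data W y (pvAt data y x) hy0 hy]
  constructor
  · intro hall j hj
    have hjl : j < (data[y.toNat]'hylt).length := by omega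
    rw [List.getD_eq_getElem _ 0 hjl]
    exact hall _ (List.mem_take_iff_getElem.2 ⟨j, by omega, rfl⟩)
  · intro hall u hu
    obtain ⟨j, hj, rfl⟩ := List.mem_take_iff_getElem.1 hu
    have h4 := hall j (by omega)
    rwa [List.getD_eq_getElem _ 0 (by omega)] at h4

-- a cell equals B's column maximum iff A's column test succeeds at that cell's value
theorem pw_col (data : List (List Int)) (W : Nat) (y x : Int)
    (hy0 : 0 ≤ y) (hy : y < (data.length : Int)) (hx0 : 0 ≤ x) (hx : x < (W : Int)) :
    (pvAt data y x == PySem.List.pyGetD ((PySem.List.pyRange 0 (W : Int) 1).map (fun x =>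
        (PySem.List.max? (data.map (fun row => PySem.List.pyGetD row x 0)) (fun v => v)).getD 0)) x 0)
      = pvColLE data (data.length : Int) x (pvAt data y x) := by
  have hylt : y.toNat < data.length := by omega
  have hrow : PySem.List.pyGetD data y [] = data[y.toNat]'hylt :=
    PySem.List.pyGetD_eq_getElem data [] hy0 hy
  have hmape := PySem.List.pyGetD_map_pyRange_of_nonneg (fun x =>
      (PySem.List.max? (data.map (fun row => PySem.List.pyGetD row x 0)) (fun v => v)).getD 0)
      (W : Int) x 0 hx0 hx
  have hcne : data.map (fun row => PySem.List.pyGetD row x 0) ≠ [] := by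
    intro hcon; rw [List.map_eq_nil_iff] at hcon
    rw [hcon] at hylt; simp at hylt
  obtain ⟨m, hm⟩ : ∃ m, PySem.List.max? (data.map (fun row => PySem.List.pyGetD row x 0))
      (fun v => v) = some m := by
    cases hmm : PySem.List.max? (data.map (fun row => PySem.List.pyGetD row x 0)) (fun v => v) with
    | none => exact absurd ((PySem.List.max?_eq_none_iff _ _).1 hmm) hcne
    | some m => exact ⟨m, rfl⟩
  have hcellmem : pvAt data y x ∈ data.map (fun row => PySem.List.pyGetD row x 0) := by
    simp only [pvAt, hrow]
    exact List.mem_map.2 ⟨data[y.toNat]'hylt, List.getElem_mem hylt, rfl⟩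
  have hmape2 : PySem.List.pyGetD ((PySem.List.pyRange 0 (W : Int) 1).map (fun x =>
      (PySem.List.max? (data.map (fun row => PySem.List.pyGetD row x 0)) (fun v => v)).getD 0)) x 0
      = (PySem.List.max? (data.map (fun row => PySem.List.pyGetD row x 0)) (fun v => v)).getD 0 :=
    hmape
  rw [hmape2, hm, Option.getD_some]
  rw [Bool.eq_iff_iff, beq_iff_eq, max_char hm hcellmem, pvColLE_iff data x (pvAt data y x)]
  constructor
  · intro hall i hi
    exact hall _ (List.mem_map.2 ⟨data[i]'hi, List.getElem_mem hi, rfl⟩)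
  · intro hall u hu
    obtain ⟨r, hr, rfl⟩ := List.mem_map.1 hu
    obtain ⟨i, hi, rfl⟩ := List.mem_iff_getElem.1 hr
    exact hall i hi

-- B's else branch equals the per-point verdict over the grid
theorem B_side (data : List (List Int)) (W : Nat) (hW : 1 ≤ W)
    (hrows : ∀ row ∈ data, W ≤ row.length) :
    ((PySem.List.pyRange 0 (data.length : Int) 1).all (fun y =>
      (PySem.List.pyRange 0 (W : Int) 1).all (fun x =>
        (pvAt data y x == PySem.List.pyGetD (data.map (fun row =>
          (PySem.List.max? (PySem.List.slice row none (some (W : Int))) (fun v => v)).getD 0)) y 0 ||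
        (pvAt data y x == PySem.List.pyGetD ((PySem.List.pyRange 0 (W : Int) 1).map (fun x =>
          (PySem.List.max? (data.map (fun row => PySem.List.pyGetD row x 0)) (fun v => v)).getD 0)) x 0)))))
      = (pvGrid (W : Int) (data.length : Int)).all (pvOK data (W : Int) (data.length : Int)) := by
  rw [pvGrid, List.all_flatMap, Bool.eq_iff_iff]
  simp only [List.all_eq_true, List.all_map, PySem.List.mem_pyRange_one]
  constructor
  · intro hB y hy x hx
    have h1 := hB y hy x hx
    rw [pw_row data W hW y x hy.1 hy.2 hx.1 hx.2
          (hrows _ (List.getElem_mem (by omega))),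
        pw_col data W y x hy.1 hy.2 hx.1 hx.2] at h1
    simpa [pvOK] using h1
  · intro hB y hy x hx
    have h1 := hB y hy x hx
    simp only [Function.comp, pvOK] at h1
    rw [pw_row data W hW y x hy.1 hy.2 hx.1 hx.2
          (hrows _ (List.getElem_mem (by omega))),
        pw_col data W y x hy.1 hy.2 hx.1 hx.2]
    simpa using h1

theorem pvMain (data : List (List Int)) (hpre : Pre_is_doable data) :
    is_doable data = is_doable_alt data := by
  obtain ⟨hne, hsh⟩ := hpre
  have hH0 : data.length ≠ 0 := by simpa using hne
  by_cases hW1 : data.headI.length = 1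
  · simp [is_doable, is_doable_alt, hW1]
  by_cases hH1 : data.length = 1
  · simp [is_doable, is_doable_alt, hH1]
  have hrows : ∀ row ∈ data, data.headI.length ≤ row.length := by
    rcases hsh with h | h | h
    · exact absurd h hW1
    · exact absurd h hH1
    · exact h
  have hgA : (((data.headI.length : Int) == 1) || ((data.length : Int) == 1)) = false := by
    simp; omega
  by_cases hW0 : data.headI.length = 0
  · -- w == 0 (empty first row): A's loops are all vacuous, B's guard fires; both return True
    rw [is_doable, is_doable_alt]
    simp only [hgA, Bool.false_eq_true, if_false]
    rw [if_pos (by simp [hW0])]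
    simp only [hW0, Nat.cast_zero]
    rw [PySem.List.pyRange_one_eq_nil (le_refl 0)]
    simp [List.foldl_fixed, PySem.Dict.keys_empty, PySem.List.sorted]
  · have hW2 : 1 ≤ data.headI.length := by omega
    have hgB : ((decide ((data.headI.length : Int) ≤ 1)) || (decide ((data.length : Int) ≤ 1))) = false := by
      simp; omega
    rw [is_doable, is_doable_alt]
    simp only [hgA, hgB, Bool.false_eq_true, if_false]
    rw [pvBuild_eq, B_side data data.headI.length hW2 hrows]
    apply A_side
    · intro lv q
      rw [mem_getD_build]
      simp [PySem.Dict.getD_empty]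
    · intro lv
      rw [keys_build]

-- ===== VERDICT (by name: the statement is the Claim_ definition above) =====
theorem is_doable_spec : Claim_equal_is_doable := by
  intro data _hdom hpre
  unfold Spec_is_doable
  exact pvMain data hpre
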